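-- pv_equiv track=rewrite | github.com/abhi293/snake_game | search_algorithms.py | dfs
-- ===== SOURCE A (Python) =====
-- DIRECTIONS = [(-1, 0), (1, 0), (0, -1), (0, 1)]
--
-- def dfs(start, goal, obstacles, rows, cols):
--     """
--     DFS algorithm to find a path from start to goal.
--     Args:
--     - start: tuple (row, col), the starting position of the snake
--     - goal: tuple (row, col), the target position (food)
--     - obstacles: set of obstacle positions
--     - rows: number of rows in the grid
--     - cols: number of columns in the grid
--
--     Returns:
--     - A list of moves that represents the path from the start to the goal.
--       If no path is found, returns an empty list.
--     """
--     stack = [(start, [])]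
--     visited = set()
--
--     while stack:
--         current, path = stack.pop()
--
--         if current in visited:
--             continue
--
--         visited.add(current)
--
--         if current == goal:
--             return path
--
--         for direction in DIRECTIONS:
--             new_row = current[0] + direction[0]
--             new_col = current[1] + direction[1]
--             new_pos = (new_row, new_col)
--
--             if (
--                 0 <= new_row < rows and
--                 0 <= new_col < cols and
--                 new_pos not in obstacles and
--                 new_pos not in visited
--             ):
--                 stack.append((new_pos, path + [direction]))
--
--     return []
-- ===== SOURCE B (Python) =====
-- DIRECTIONS = [(-1, 0), (1, 0), (0, -1), (0, 1)]
--
-- def dfs(start, goal, obstacles, rows, cols):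
--     # Same DFS traversal, but each stack entry stores a parent pointer and the
--     # move taken instead of a full copy of the path; the path is reconstructed
--     # once, at the goal, by walking the parent chain.
--     entries = [(start, -1, None)]   # (position, parent entry index, move taken)
--     stack = [0]                     # stack of entry indices
--     visited = set()
--     while stack:
--         i = stack.pop()
--         current = entries[i][0]
--         if current in visited:
--             continue
--         visited.add(current)
--         if current == goal:
--             moves = []
--             j = i
--             while entries[j][1] != -1:
--                 moves.append(entries[j][2])
--                 j = entries[j][1]
--             return moves[::-1]
--         for d in DIRECTIONS:
--             new_pos = (current[0] + d[0], current[1] + d[1])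
--             if (0 <= new_pos[0] < rows and 0 <= new_pos[1] < cols
--                     and new_pos not in obstacles and new_pos not in visited):
--                 stack.append(len(entries))
--                 entries.append((new_pos, i, d))
--     return []
-- ===== Notes on version B (the rewrite author's own statement) =====
-- stated objective: alternative
-- what changed: Each stack push no longer copies the whole path (path + [direction]); stack entries carry a parent-pointer/move pair and the move list is reconstructed once when the goal is popped (O(V+L) work instead of O(V*L), though a timing run could not measure a difference).
import Mathlib
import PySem

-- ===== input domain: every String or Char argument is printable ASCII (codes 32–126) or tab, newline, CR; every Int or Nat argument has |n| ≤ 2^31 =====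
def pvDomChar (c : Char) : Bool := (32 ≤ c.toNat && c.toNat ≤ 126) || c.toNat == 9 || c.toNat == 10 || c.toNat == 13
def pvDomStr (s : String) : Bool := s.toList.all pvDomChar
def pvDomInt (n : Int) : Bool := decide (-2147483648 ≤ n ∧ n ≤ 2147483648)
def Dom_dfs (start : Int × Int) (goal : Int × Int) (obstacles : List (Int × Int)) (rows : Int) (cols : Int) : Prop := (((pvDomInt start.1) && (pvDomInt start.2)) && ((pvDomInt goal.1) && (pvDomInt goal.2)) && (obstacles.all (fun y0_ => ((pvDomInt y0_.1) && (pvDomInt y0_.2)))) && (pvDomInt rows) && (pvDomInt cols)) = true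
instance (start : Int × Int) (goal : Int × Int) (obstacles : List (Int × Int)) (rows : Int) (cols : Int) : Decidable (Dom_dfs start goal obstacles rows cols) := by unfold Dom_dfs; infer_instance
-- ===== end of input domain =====

-- B replaces A's per-push path copying (each stack entry carries a full copy of the
-- path) by parent/move pointers per stack entry, reconstructing the move list once at
-- the goal; same DFS order, same return value.

def DIRS : List (Int × Int) := [(-1, 0), (1, 0), (0, -1), (0, 1)]

-- fuel bound for the while-loops: total pushes ≤ 1 + 4·(#cells + 1); only a totality
-- guard, never reached (both loops stop when the stack empties)
def dfsFuel (rows cols : Int) : Nat := 4 * (rows.toNat * cols.toNat) + 10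

-- ===== PORT A =====
-- body of A's 'for direction in DIRECTIONS' loop (one conditional push)
def pushA (rows cols : Int) (obstacles visited : List (Int × Int)) (current : Int × Int)
    (path : List (Int × Int)) (st : List ((Int × Int) × List (Int × Int))) (d : Int × Int) :
    List ((Int × Int) × List (Int × Int)) :=
  let np : Int × Int := (current.1 + d.1, current.2 + d.2)
  if 0 ≤ np.1 ∧ np.1 < rows ∧ 0 ≤ np.2 ∧ np.2 < cols ∧ np ∉ obstacles ∧ np ∉ visited then
    (np, path ++ [d]) :: st
  else st

-- A's while-loop; the stack is kept top-first (Python's list.pop() end = our head)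
def dfsLoopA (goal : Int × Int) (obstacles : List (Int × Int)) (rows cols : Int) :
    Nat → List ((Int × Int) × List (Int × Int)) → List (Int × Int) → List (Int × Int)
  | 0, _, _ => []
  | _ + 1, [], _ => []
  | fuel + 1, (current, path) :: rest, visited =>
    if current ∈ visited then dfsLoopA goal obstacles rows cols fuel rest visited
    else
      let visited' := PySem.Set.add visited current
      if current = goal then path
      else
        dfsLoopA goal obstacles rows cols fuel
          (DIRS.foldl (pushA rows cols obstacles visited' current path) rest) visited'

def dfs (start : Int × Int) (goal : Int × Int) (obstacles : List (Int × Int)) (rows : Int) (cols : Int) : List (Int × Int) :=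
  dfsLoopA goal obstacles rows cols (dfsFuel rows cols) [(start, [])] PySem.Set.empty

-- ===== PORT B =====
-- an entry of Source B's 'entries' list: (position, parent entry index, move taken)
abbrev BEntry : Type := (Int × Int) × Int × Option (Int × Int)

-- Source B's reconstruction loop ('while entries[j][1] != -1'); the root's move is None,
-- never read, so getD's default is irrelevant
def reconAux (entries : List BEntry) : Nat → Int → List (Int × Int) → List (Int × Int)
  | 0, _, acc => acc
  | f + 1, j, acc =>
    match PySem.List.pyGet? entries j with
    | none => acc
    | some e => if e.2.1 = -1 then acc else reconAux entries f e.2.1 (acc ++ [e.2.2.getD (0, 0)])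

-- body of Source B's 'for d in DIRECTIONS' loop: append an entry, push its index
def pushB (rows cols : Int) (obstacles visited : List (Int × Int)) (current : Int × Int)
    (i : Int) (s : List BEntry × List Int) (d : Int × Int) : List BEntry × List Int :=
  let np : Int × Int := (current.1 + d.1, current.2 + d.2)
  if 0 ≤ np.1 ∧ np.1 < rows ∧ 0 ≤ np.2 ∧ np.2 < cols ∧ np ∉ obstacles ∧ np ∉ visited then
    (s.1 ++ [(np, i, some d)], ((s.1.length : Int) :: s.2))
  else s

-- Source B's while-loop; the index stack is kept top-first
def dfsLoopB (goal : Int × Int) (obstacles : List (Int × Int)) (rows cols : Int) :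
    Nat → List BEntry → List Int → List (Int × Int) → List (Int × Int)
  | 0, _, _, _ => []
  | _ + 1, _, [], _ => []
  | fuel + 1, entries, i :: rest, visited =>
    match PySem.List.pyGet? entries i with
    | none => []  -- IndexError (unreachable: the stack holds only valid entry indices)
    | some e =>
      if e.1 ∈ visited then dfsLoopB goal obstacles rows cols fuel entries rest visited
      else
        let visited' := PySem.Set.add visited e.1
        if e.1 = goal then (reconAux entries entries.length i []).reverse
        else
          let s := DIRS.foldl (pushB rows cols obstacles visited' e.1 i) (entries, rest)
          dfsLoopB goal obstacles rows cols fuel s.1 s.2 visited'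

def dfs_alt (start : Int × Int) (goal : Int × Int) (obstacles : List (Int × Int)) (rows : Int) (cols : Int) : List (Int × Int) :=
  dfsLoopB goal obstacles rows cols (dfsFuel rows cols) [(start, -1, none)] [0] PySem.Set.empty

-- ===== PRECONDITION & SPEC =====
def Spec_dfs (start : Int × Int) (goal : Int × Int) (obstacles : List (Int × Int)) (rows : Int) (cols : Int) (out : List (Int × Int)) : Prop := out = dfs_alt start goal obstacles rows cols
instance (start : Int × Int) (goal : Int × Int) (obstacles : List (Int × Int)) (rows : Int) (cols : Int) (out : List (Int × Int)) : Decidable (Spec_dfs start goal obstacles rows cols out) := by unfold Spec_dfs; infer_instance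

-- ===== CLAIM (what is proved, stated in full; the proofs are below) =====
def Claim_equal_dfs : Prop := ∀ (start : Int × Int) (goal : Int × Int) (obstacles : List (Int × Int)) (rows : Int) (cols : Int), Dom_dfs start goal obstacles rows cols → Spec_dfs start goal obstacles rows cols (dfs start goal obstacles rows cols)

-- ===== LEMMAS AND PROOFS =====

-- the move list an entry index denotes: walk the parent chain to the root
def pathSpec (entries : List BEntry) (k : Nat) : List (Int × Int) :=
  let e := entries[k]?.getD ((0, 0), -1, none)
  if hp : 0 ≤ e.2.1 ∧ e.2.1.toNat < k then
    pathSpec entries e.2.1.toNat ++ [e.2.2.getD (0, 0)]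
  else []
  termination_by k
  decreasing_by exact hp.2

-- the A-stack entry an index denotes
def viewOf (entries : List BEntry) (i : Int) : (Int × Int) × List (Int × Int) :=
  match entries[i.toNat]? with
  | some e => (e.1, pathSpec entries i.toNat)
  | none => ((0, 0), [])

-- well-formed entry lists: parents are -1 or earlier valid indices
abbrev wfE (entries : List BEntry) : Prop :=
  ∀ (k : Nat) (e : BEntry), entries[k]? = some e → e.2.1 = -1 ∨ (0 ≤ e.2.1 ∧ e.2.1.toNat < k)

theorem pathSpec_append (entries ex : List BEntry) :
    ∀ k, k < entries.length → pathSpec (entries ++ ex) k = pathSpec entries k := by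
  intro k
  induction k using Nat.strong_induction_on with
  | _ k ih =>
    intro hk
    conv_lhs => rw [pathSpec]
    conv_rhs => rw [pathSpec]
    rw [List.getElem?_append_left hk]
    split_ifs with hp
    · rw [ih _ hp.2 (lt_trans hp.2 hk)]
    · rfl

theorem viewOf_append (entries ex : List BEntry) (i : Int) (_h0 : 0 ≤ i)
    (hk : i.toNat < entries.length) : viewOf (entries ++ ex) i = viewOf entries i := by
  rw [viewOf, viewOf, List.getElem?_append_left hk]
  cases hl : entries[i.toNat]? with
  | none => rfl
  | some e => simp only [pathSpec_append entries ex i.toNat hk]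

theorem reconAux_eq (entries : List BEntry) (hwf : wfE entries) :
    ∀ k f acc, k < entries.length → k < f →
      reconAux entries f (k : Int) acc = acc ++ (pathSpec entries k).reverse := by
  intro k
  induction k using Nat.strong_induction_on with
  | _ k ih =>
    intro f acc hk hf
    cases f with
    | zero => omega
    | succ f' =>
      obtain ⟨e, hl⟩ : ∃ e, entries[k]? = some e := by
        cases hle : entries[k]? with
        | none => rw [List.getElem?_eq_none_iff] at hle; omega
        | some e => exact ⟨e, rfl⟩
      have hred : reconAux entries (f' + 1) (k : Int) acc =
          if e.2.1 = -1 then acc else reconAux entries f' e.2.1 (acc ++ [e.2.2.getD (0, 0)]) := by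
        rw [reconAux, PySem.List.pyGet?_natCast, hl]
      have hps : pathSpec entries k =
          if 0 ≤ e.2.1 ∧ e.2.1.toNat < k then
            pathSpec entries e.2.1.toNat ++ [e.2.2.getD (0, 0)]
          else [] := by
        rw [pathSpec, hl]
        simp only [Option.getD_some]
        split_ifs with h1 <;> rfl
      rcases hwf k e hl with hroot | hpar
      · rw [hred, if_pos hroot, hps, if_neg (by rw [hroot]; omega)]
        simp
      · have hne : ¬ (e.2.1 = -1) := by omega
        rw [hred, if_neg hne, hps, if_pos hpar]
        have hcast : reconAux entries f' e.2.1 (acc ++ [e.2.2.getD (0, 0)]) =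
            reconAux entries f' ((e.2.1.toNat : Nat) : Int) (acc ++ [e.2.2.getD (0, 0)]) := by
          rw [Int.toNat_of_nonneg hpar.1]
        rw [hcast, ih e.2.1.toNat hpar.2 f' (acc ++ [e.2.2.getD (0, 0)]) (lt_trans hpar.2 hk) (by omega)]
        simp

theorem pushFold_inv (rows cols : Int) (obstacles visited' : List (Int × Int))
    (current : Int × Int) (iCur : Int) (path : List (Int × Int)) :
    ∀ (ds : List (Int × Int)) (entries : List BEntry) (stB : List Int)
      (stA : List ((Int × Int) × List (Int × Int))),
    wfE entries →
    (∀ i ∈ stB, 0 ≤ i ∧ i.toNat < entries.length) →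
    (0 ≤ iCur ∧ iCur.toNat < entries.length) →
    pathSpec entries iCur.toNat = path →
    stA = stB.map (viewOf entries) →
    wfE (ds.foldl (pushB rows cols obstacles visited' current iCur) (entries, stB)).1 ∧
    (∀ i ∈ (ds.foldl (pushB rows cols obstacles visited' current iCur) (entries, stB)).2,
        0 ≤ i ∧ i.toNat < (ds.foldl (pushB rows cols obstacles visited' current iCur) (entries, stB)).1.length) ∧
    ds.foldl (pushA rows cols obstacles visited' current path) stA =
      (ds.foldl (pushB rows cols obstacles visited' current iCur) (entries, stB)).2.map
        (viewOf (ds.foldl (pushB rows cols obstacles visited' current iCur) (entries, stB)).1) := by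
  intro ds
  induction ds with
  | nil => intro entries stB stA hwf hb hc hp hm; exact ⟨hwf, hb, hm⟩
  | cons d ds ih =>
    intro entries stB stA hwf hb hc hp hm
    by_cases hcond : 0 ≤ current.1 + d.1 ∧ current.1 + d.1 < rows ∧ 0 ≤ current.2 + d.2 ∧
        current.2 + d.2 < cols ∧ (current.1 + d.1, current.2 + d.2) ∉ obstacles ∧
        (current.1 + d.1, current.2 + d.2) ∉ visited'
    · have hstepB : pushB rows cols obstacles visited' current iCur (entries, stB) d =
          (entries ++ [((current.1 + d.1, current.2 + d.2), iCur, some d)], (entries.length : Int) :: stB) := by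
        simp only [pushB, if_pos hcond]
      have hstepA : pushA rows cols obstacles visited' current path stA d =
          (((current.1 + d.1, current.2 + d.2), path ++ [d]) :: stA) := by
        simp only [pushA, if_pos hcond]
      set e' : BEntry := ((current.1 + d.1, current.2 + d.2), iCur, some d) with he'
      have hwf' : wfE (entries ++ [e']) := by
        intro k e hl
        rcases Nat.lt_trichotomy k entries.length with hlt | heq | hgt
        · exact hwf k e (by rwa [List.getElem?_append_left hlt] at hl)
        · subst heq
          rw [List.getElem?_concat_length] at hl
          cases hl
          right; exact ⟨hc.1, hc.2⟩
        · rw [List.getElem?_eq_none_iff.mpr (by simp; omega)] at hl; cases hl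
      have hp0 : e'.1 = (current.1 + d.1, current.2 + d.2) := by rw [he']
      have hp1 : e'.2.1 = iCur := by rw [he']
      have hp2 : e'.2.2 = some d := by rw [he']
      have hlook : (entries ++ [e'])[entries.length]? = some e' := List.getElem?_concat_length
      have hps' : pathSpec (entries ++ [e']) entries.length = path ++ [d] := by
        rw [pathSpec, hlook]
        simp only [Option.getD_some, hp1, hp2]
        rw [dif_pos ⟨hc.1, hc.2⟩]
        rw [pathSpec_append entries [e'] iCur.toNat hc.2, hp]
      have hview : viewOf (entries ++ [e']) (entries.length : Int) =
          ((current.1 + d.1, current.2 + d.2), path ++ [d]) := by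
        unfold viewOf
        rw [Int.toNat_natCast, hlook]
        show (e'.1, pathSpec (entries ++ [e']) entries.length) = _
        rw [hp0, hps']
      rw [List.foldl_cons, List.foldl_cons, hstepA, hstepB]
      apply ih
      · exact hwf'
      · intro i hi
        rcases List.mem_cons.mp hi with h1 | h2
        · subst h1; simp
        · have := hb i h2; simp; omega
      · simp; omega
      · rw [pathSpec_append entries [e'] iCur.toNat hc.2, hp]
      · rw [List.map_cons, hview, hm]
        congr 1
        apply List.map_congr_left
        intro i hi
        exact (viewOf_append entries [e'] i (hb i hi).1 (hb i hi).2).symm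
    · have hstepB : pushB rows cols obstacles visited' current iCur (entries, stB) d = (entries, stB) := by
        simp only [pushB, if_neg hcond]
      have hstepA : pushA rows cols obstacles visited' current path stA d = stA := by
        simp only [pushA, if_neg hcond]
      rw [List.foldl_cons, List.foldl_cons, hstepA, hstepB]
      exact ih entries stB stA hwf hb hc hp hm

theorem loop_eq (goal : Int × Int) (obstacles : List (Int × Int)) (rows cols : Int) :
    ∀ (fuel : Nat) (entries : List BEntry) (stB : List Int)
      (stA : List ((Int × Int) × List (Int × Int))) (visited : List (Int × Int)),
    wfE entries →
    (∀ i ∈ stB, 0 ≤ i ∧ i.toNat < entries.length) →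
    stA = stB.map (viewOf entries) →
    dfsLoopA goal obstacles rows cols fuel stA visited =
      dfsLoopB goal obstacles rows cols fuel entries stB visited := by
  intro fuel
  induction fuel with
  | zero =>
    intro entries stB stA visited _ _ _
    rw [dfsLoopA, dfsLoopB]
  | succ fuel ih =>
    intro entries stB stA visited hwf hb hm
    cases stB with
    | nil =>
      subst hm
      simp only [List.map_nil]
      rw [dfsLoopA, dfsLoopB]
    | cons i rest =>
      obtain ⟨hi0, hilen⟩ := hb i (List.mem_cons_self)
      obtain ⟨e, hl⟩ : ∃ e, entries[i.toNat]? = some e := by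
        cases hle : entries[i.toNat]? with
        | none => rw [List.getElem?_eq_none_iff] at hle; omega
        | some e => exact ⟨e, rfl⟩
      have hget : PySem.List.pyGet? entries i = some e := by
        rw [PySem.List.pyGet?_of_nonneg entries hi0, hl]
      have hview : viewOf entries i = (e.1, pathSpec entries i.toNat) := by
        unfold viewOf
        rw [hl]
      have hAred : dfsLoopA goal obstacles rows cols (fuel + 1)
          ((e.1, pathSpec entries i.toNat) :: rest.map (viewOf entries)) visited =
          (if e.1 ∈ visited then
            dfsLoopA goal obstacles rows cols fuel (rest.map (viewOf entries)) visited
          else if e.1 = goal then pathSpec entries i.toNat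
          else
            dfsLoopA goal obstacles rows cols fuel
              (DIRS.foldl (pushA rows cols obstacles (PySem.Set.add visited e.1) e.1
                (pathSpec entries i.toNat)) (rest.map (viewOf entries)))
              (PySem.Set.add visited e.1)) := by
        rw [dfsLoopA]
      have hBred : dfsLoopB goal obstacles rows cols (fuel + 1) entries (i :: rest) visited =
          (if e.1 ∈ visited then
            dfsLoopB goal obstacles rows cols fuel entries rest visited
          else if e.1 = goal then (reconAux entries entries.length i []).reverse
          else
            dfsLoopB goal obstacles rows cols fuel
              (DIRS.foldl (pushB rows cols obstacles (PySem.Set.add visited e.1) e.1 i)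
                (entries, rest)).1
              (DIRS.foldl (pushB rows cols obstacles (PySem.Set.add visited e.1) e.1 i)
                (entries, rest)).2
              (PySem.Set.add visited e.1)) := by
        rw [dfsLoopB, hget]
      rw [hm, List.map_cons, hview, hAred, hBred]
      split_ifs with hv hg
      · exact ih entries rest _ visited hwf (fun j hj => hb j (List.mem_cons_of_mem i hj)) rfl
      · have hcast : (reconAux entries entries.length i []).reverse =
            (reconAux entries entries.length ((i.toNat : Nat) : Int) []).reverse := by
          rw [Int.toNat_of_nonneg hi0]
        rw [hcast, reconAux_eq entries hwf i.toNat entries.length [] hilen hilen]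
        simp
      · obtain ⟨hwf', hb', hm'⟩ := pushFold_inv rows cols obstacles
          (PySem.Set.add visited e.1) e.1 i (pathSpec entries i.toNat) DIRS entries rest
          (rest.map (viewOf entries)) hwf
          (fun j hj => hb j (List.mem_cons_of_mem i hj)) ⟨hi0, hilen⟩ rfl rfl
        exact ih _ _ _ _ hwf' hb' hm'

-- ===== VERDICT (by name: the statement is the Claim_ definition above) =====
theorem dfs_spec : Claim_equal_dfs := by
  intro start goal obstacles rows cols _
  unfold Spec_dfs dfs dfs_alt
  apply loop_eq
  · intro k e hl
    cases k with
    | zero => simp at hl; subst hl; left; rfl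
    | succ k => simp at hl
  · intro i hi
    simp at hi
    subst hi
    exact ⟨le_refl 0, by simp⟩
  · have h0 : pathSpec [((start : Int × Int), (-1 : Int), (none : Option (Int × Int)))] 0 = [] := by
      rw [pathSpec]
      simp
    rw [List.map_cons, List.map_nil]
    unfold viewOf
    simp [h0]
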